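-- pv_equiv track=rewrite | github.com/Qwaz/solved-hacking-problem | CSAW/2017 Quals/almost_xor/almostxor.py | get_vals
-- ===== SOURCE A (Python) =====
-- def get_vals(x, n):
-- 	vals = []
-- 	mask = (1 << n) - 1
-- 	for i in range(8):
-- 		vals.append(x & mask)
-- 		x = x >> n
-- 	vals.reverse()
-- 	return vals
-- ===== SOURCE B (Python) =====
-- def get_vals(x, n):
--     base = 1 << n
--     def split(v, k):
--         if k == 1:
--             return [v % base]
--         q, r = divmod(v, base)
--         return split(q, k - 1) + [r]
--     return split(x, 8)
-- ===== Notes on version B (the rewrite author's own statement) =====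
-- stated objective: alternative
-- what changed: Replaces A's iterative bitwise shift-and-mask loop (append least-significant-first, then reverse in place) by a recursive base-2^n digit extraction with divmod that builds the list most-significant-first, with no mask, no bitwise ops and no reverse.
import Mathlib
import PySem

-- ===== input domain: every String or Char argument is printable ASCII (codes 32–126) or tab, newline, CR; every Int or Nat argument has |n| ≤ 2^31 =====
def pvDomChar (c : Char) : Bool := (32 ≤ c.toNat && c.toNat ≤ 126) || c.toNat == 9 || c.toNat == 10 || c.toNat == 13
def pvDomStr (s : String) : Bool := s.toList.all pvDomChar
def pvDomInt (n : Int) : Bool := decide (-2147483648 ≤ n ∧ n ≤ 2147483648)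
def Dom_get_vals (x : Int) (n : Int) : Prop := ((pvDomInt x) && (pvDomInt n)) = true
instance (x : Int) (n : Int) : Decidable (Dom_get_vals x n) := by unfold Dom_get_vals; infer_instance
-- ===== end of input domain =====

-- B extracts the eight groups as the digits of x in base 2^n, by recursive divmod building
-- the list most-significant-first, instead of A's iterative shift-and-append loop with a
-- final reverse (objective: alternative; same cost).

-- ===== PORT A =====
-- loop state: (vals, current x); after the loop, vals is reversed
def get_vals (x : Int) (n : Int) : List Int :=
  let mask : Int := ((1:Int) <<< n.toNat) - 1
  let st := (PySem.List.pyRange 0 8 1).foldl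
    (fun (st : List Int × Int) _ => (st.1 ++ [PySem.Int.band st.2 mask], st.2 >>> n.toNat)) ([], x)
  st.1.reverse

-- ===== PORT B =====
-- 'split(v, k)' of Source B; k only ever takes the values 8, 7, …, 1 (the guard 'k ≤ 1' is
-- Python's 'k == 1' base case, made total for the unreachable fuel 0)
def splitB (base : Int) (v : Int) (k : Nat) : List Int :=
  if k ≤ 1 then [PySem.Int.mod v base]
  else splitB base (PySem.Int.floordiv v base) (k - 1) ++ [PySem.Int.mod v base]
termination_by k

def get_vals_alt (x : Int) (n : Int) : List Int :=
  splitB ((1:Int) <<< n.toNat) x 8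

-- ===== PRECONDITION & SPEC =====
-- Python's '<<' and '>>' raise ValueError for a negative shift count, so A (and B) raise when n < 0.
def Pre_get_vals (_x : Int) (n : Int) : Prop := 0 ≤ n
instance (x : Int) (n : Int) : Decidable (Pre_get_vals x n) := by unfold Pre_get_vals; infer_instance
def pvWitness_get_vals : Int × Int := (2017, 3)
def Spec_get_vals (x : Int) (n : Int) (out : List Int) : Prop := out = get_vals_alt x n
instance (x : Int) (n : Int) (out : List Int) : Decidable (Spec_get_vals x n out) := by unfold Spec_get_vals; infer_instance

-- ===== CLAIM (what is proved, stated in full; the proofs are below) =====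
def Claim_equal_get_vals : Prop := ∀ (x : Int) (n : Int), Dom_get_vals x n → Pre_get_vals x n → Spec_get_vals x n (get_vals x n)

-- ===== LEMMAS AND PROOFS =====
theorem pyRange_08 : PySem.List.pyRange 0 8 1 = [0,1,2,3,4,5,6,7] := by decide

theorem one_shl (s : Nat) : (1:Int) <<< s = 2^s := by simp [Int.shiftLeft_eq]

theorem shr_pow (x : Int) (s : Nat) : x >>> s = x / 2^s := by
  rw [Int.shiftRight_eq_div_pow]; push_cast; ring_nf

-- Python's a & (2^K - 1) is a mod 2^K, for every integer a
theorem band_mask (a : Int) (K : Nat) : PySem.Int.band a (((1:Int) <<< K) - 1) = a % 2^K := by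
  have hP : (0:Nat) < 2^K := Nat.two_pow_pos K
  have h2K : ((2:Int))^K = ((2^K : Nat) : Int) := by push_cast; rfl
  have hm : ((1:Int) <<< K) - 1 = ((2^K - 1 : Nat) : Int) := by
    push_cast [Nat.one_le_two_pow, Int.shiftLeft_eq]
    ring
  rw [hm, h2K]
  by_cases ha : 0 ≤ a
  · rw [PySem.Int.band_of_nonneg ha (by positivity)]
    rw [Int.toNat_natCast, Nat.and_two_pow_sub_one_eq_mod]
    conv_rhs => rw [← Int.toNat_of_nonneg ha]
    push_cast
    rfl
  · unfold PySem.Int.band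
    rw [if_neg ha, if_pos (by positivity)]
    have hy : a = -1 - ((-a - 1).toNat : Int) := by omega
    set y := (-a - 1).toNat with hyd
    rw [Int.toNat_natCast, Nat.and_comm, Nat.and_two_pow_sub_one_eq_mod]
    have hmod : y % 2^K < 2^K := Nat.mod_lt _ hP
    have hyy : (y:Int) = ((2^K : Nat) : Int) * ((y / 2^K : Nat) : Int) + ((y % 2^K : Nat) : Int) := by
      exact_mod_cast (Nat.div_add_mod y (2^K)).symm
    have hc : ((2^K - 1 - y % 2^K : Nat) : Int) = ((2^K : Nat) : Int) - 1 - ((y % 2^K : Nat) : Int) := by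
      push_cast [show 1 + y % 2^K ≤ 2^K from by omega, Nat.sub_sub]
      ring
    have hrw : a = ((2^K - 1 - y % 2^K : Nat) : Int) + ((2^K : Nat) : Int) * (-((y / 2^K : Nat) : Int) - 1) := by
      rw [hy, hc, hyy]; ring
    conv_rhs => rw [hrw]
    rw [Int.add_mul_emod_self_left]
    rw [Int.emod_eq_of_lt (by positivity) (by exact_mod_cast (show 2^K - 1 - y % 2^K < 2^K from by omega))]

theorem band_mask' (a : Int) (K : Nat) : PySem.Int.band a (2^K - 1) = a % 2^K := by
  have h := band_mask a K
  rwa [one_shl] at h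

theorem fdiv_pow (a : Int) (s : Nat) : PySem.Int.floordiv a ((2:Int)^s) = a / 2^s :=
  PySem.Int.floordiv_eq_ediv_of_pos (by positivity)

theorem mod_pow (a : Int) (s : Nat) : PySem.Int.mod a ((2:Int)^s) = a % 2^s :=
  PySem.Int.mod_eq_emod_of_pos (by positivity)

theorem splitB_eight (b v : Int) : splitB b v 8 =
    [PySem.Int.mod (PySem.Int.floordiv (PySem.Int.floordiv (PySem.Int.floordiv (PySem.Int.floordiv
       (PySem.Int.floordiv (PySem.Int.floordiv (PySem.Int.floordiv v b) b) b) b) b) b) b) b,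
     PySem.Int.mod (PySem.Int.floordiv (PySem.Int.floordiv (PySem.Int.floordiv (PySem.Int.floordiv
       (PySem.Int.floordiv (PySem.Int.floordiv v b) b) b) b) b) b) b,
     PySem.Int.mod (PySem.Int.floordiv (PySem.Int.floordiv (PySem.Int.floordiv (PySem.Int.floordiv
       (PySem.Int.floordiv v b) b) b) b) b) b,
     PySem.Int.mod (PySem.Int.floordiv (PySem.Int.floordiv (PySem.Int.floordiv (PySem.Int.floordiv v b) b) b) b) b,
     PySem.Int.mod (PySem.Int.floordiv (PySem.Int.floordiv (PySem.Int.floordiv v b) b) b) b,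
     PySem.Int.mod (PySem.Int.floordiv (PySem.Int.floordiv v b) b) b,
     PySem.Int.mod (PySem.Int.floordiv v b) b,
     PySem.Int.mod v b] := by
  rw [splitB]; norm_num
  rw [splitB]; norm_num
  rw [splitB]; norm_num
  rw [splitB]; norm_num
  rw [splitB]; norm_num
  rw [splitB]; norm_num
  rw [splitB]; norm_num
  rw [splitB]; norm_num

-- ===== VERDICT (by name: the statement is the Claim_ definition above) =====
theorem get_vals_spec : Claim_equal_get_vals := by
  intro x n _ hn
  unfold Spec_get_vals get_vals get_vals_alt
  simp only [pyRange_08, List.foldl, splitB_eight,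
    List.nil_append, List.cons_append, List.reverse_cons, List.reverse_nil,
    one_shl, band_mask', fdiv_pow, mod_pow, shr_pow]
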